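-- pv_equiv track=rewrite | github.com/kekellllll/GraphCodeBERT--RTL | demo_mij_matrix_applications.py | create_position_encoding
-- ===== SOURCE A (Python) =====
-- from typing import Dict, List, Tuple
--
-- def create_position_encoding(source_tokens: List[str], comment_tokens: List[str],
--                            code_tokens: List[str], dfg_nodes: List[str]) -> List[int]:
--     """
--     创建位置编码
--     0: DFG节点 (DFG nodes)
--     1: 注释 (Comments)
--     2+: 代码标记 (Code tokens)
--     """
--     position_idx = []
--     comment_start = 1  # 跳过<cls>
--     code_start = comment_start + len(comment_tokens) + 1  # +1 for <sep>
--     dfg_start = code_start + len(code_tokens)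
--
--     for i, token in enumerate(source_tokens):
--         if i == 0:  # <cls>
--             position_idx.append(2)
--         elif comment_start <= i < code_start - 1:  # 注释部分
--             position_idx.append(1)
--         elif i == code_start - 1:  # <sep>
--             position_idx.append(1)
--         elif code_start <= i < dfg_start:  # 代码部分
--             position_idx.append(i - code_start + 2)
--         else:  # DFG节点部分
--             position_idx.append(0)
--
--     return position_idx
-- ===== SOURCE B (Python) =====
-- def create_position_encoding(source_tokens, comment_tokens, code_tokens, dfg_nodes):
--     n = len(source_tokens)
--     code_start = len(comment_tokens) + 2
--     full = [2] + [1] * (code_start - 1) + list(range(2, 2 + len(code_tokens))) + [0] * n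
--     return full[:n]
-- ===== Notes on version B (the rewrite author's own statement) =====
-- stated objective: simpler
-- what changed: Replaces the per-index five-way conditional loop with direct concatenation of the four region blocks ([2], ones, a range, zeros) sliced to len(source_tokens).
import Mathlib
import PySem

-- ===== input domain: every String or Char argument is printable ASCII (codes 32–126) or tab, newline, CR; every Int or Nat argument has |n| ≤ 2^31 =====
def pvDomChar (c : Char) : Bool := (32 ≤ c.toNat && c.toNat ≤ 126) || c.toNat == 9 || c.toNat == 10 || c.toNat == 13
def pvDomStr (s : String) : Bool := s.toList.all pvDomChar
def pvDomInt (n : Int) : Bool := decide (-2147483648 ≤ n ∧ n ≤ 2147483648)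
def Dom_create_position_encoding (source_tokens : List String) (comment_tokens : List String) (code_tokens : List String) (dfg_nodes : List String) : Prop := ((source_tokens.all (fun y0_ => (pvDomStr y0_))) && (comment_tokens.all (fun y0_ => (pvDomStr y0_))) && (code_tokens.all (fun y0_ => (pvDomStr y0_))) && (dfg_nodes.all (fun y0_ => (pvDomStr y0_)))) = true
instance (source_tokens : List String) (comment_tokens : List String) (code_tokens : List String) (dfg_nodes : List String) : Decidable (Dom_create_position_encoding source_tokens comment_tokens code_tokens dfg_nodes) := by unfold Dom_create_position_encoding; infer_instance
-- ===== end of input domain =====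

-- B replaces A's per-index five-way branch with region-block concatenation plus a slice (objective: simpler).

-- ===== PORT A =====
-- per-index branch: for i, token in enumerate(source_tokens): append by region of i
def create_position_encoding (source_tokens : List String) (comment_tokens : List String) (code_tokens : List String) (dfg_nodes : List String) : List Int :=
  let comment_start : Int := 1
  let code_start : Int := comment_start + comment_tokens.length + 1
  let dfg_start : Int := code_start + code_tokens.length
  (PySem.List.enumerate source_tokens 0).map (fun p =>
    let i := p.1
    if i = 0 then (2 : Int)
    else if comment_start ≤ i ∧ i < code_start - 1 then 1
    else if i = code_start - 1 then 1
    else if code_start ≤ i ∧ i < dfg_start then i - code_start + 2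
    else 0)

-- ===== PORT B =====
-- block concatenation: [2] + [1]*(code_start-1) + range(2, 2+code_len) + [0]*n, sliced to n
def create_position_encoding_alt (source_tokens : List String) (comment_tokens : List String) (code_tokens : List String) (dfg_nodes : List String) : List Int :=
  let n := source_tokens.length
  let code_start := comment_tokens.length + 2
  let full : List Int :=
    [2] ++ List.replicate (code_start - 1) 1
        ++ PySem.List.pyRange 2 (2 + code_tokens.length) 1
        ++ List.replicate n 0
  full.take n

-- ===== PRECONDITION & SPEC =====
def Spec_create_position_encoding (source_tokens : List String) (comment_tokens : List String) (code_tokens : List String) (dfg_nodes : List String) (out : List Int) : Prop := out = create_position_encoding_alt source_tokens comment_tokens code_tokens dfg_nodes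
instance (source_tokens : List String) (comment_tokens : List String) (code_tokens : List String) (dfg_nodes : List String) (out : List Int) : Decidable (Spec_create_position_encoding source_tokens comment_tokens code_tokens dfg_nodes out) := by unfold Spec_create_position_encoding; infer_instance

-- ===== CLAIM (what is proved, stated in full; the proofs are below) =====
def Claim_equal_create_position_encoding : Prop := ∀ (source_tokens : List String) (comment_tokens : List String) (code_tokens : List String) (dfg_nodes : List String), Dom_create_position_encoding source_tokens comment_tokens code_tokens dfg_nodes → Spec_create_position_encoding source_tokens comment_tokens code_tokens dfg_nodes (create_position_encoding source_tokens comment_tokens code_tokens dfg_nodes)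

-- ===== LEMMAS AND PROOFS =====

-- ===== VERDICT (by name: the statement is the Claim_ definition above) =====
theorem create_position_encoding_spec : Claim_equal_create_position_encoding := by
  intro s cm co d _
  unfold Spec_create_position_encoding create_position_encoding create_position_encoding_alt
  dsimp only
  apply List.ext_getElem
  · simp [PySem.List.length_enumerate, PySem.List.length_pyRange_one]
    omega
  · intro k h1 h2
    simp only [List.getElem_map, PySem.List.getElem_enumerate, List.getElem_take,
      List.getElem_append, List.getElem_replicate, List.length_replicate,
      List.length_cons, List.length_nil, List.length_append,
      PySem.List.length_pyRange_one, PySem.List.getElem_pyRange_one, List.getElem_cons]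
    simp only [List.length_map, PySem.List.length_enumerate] at h1
    split_ifs <;> push_cast <;> omega
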